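-- pv_equiv track=rewrite | github.com/Dies-Irae-mu/game | world/wod20th/utils/mortalplus_utils.py | calculate_kinain_art_cost
-- ===== SOURCE A (Python) =====
-- def calculate_kinain_art_cost(current_rating: int, new_rating: int) -> int:
--     """
--     Calculate XP cost for Kinain Arts.
--     Cost is 3 XP then Current Rating * 4 XP.
--     """
--     total_cost = 0
--     if current_rating == 0:
--         total_cost = 3  # Initial cost
--         current_rating = 1
--
--     for rating in range(current_rating + 1, new_rating + 1):
--         total_cost += (rating - 1) * 4
--
--     return total_cost
-- ===== SOURCE B (Python) =====
-- def _art_total(rating):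
--     # Cumulative cost function: _art_total(n) - _art_total(c) telescopes the 4*(i-1) terms.
--     return 2 * rating * (rating - 1)
--
-- def _raise_cost(current, new):
--     # Cost to raise a nonzero rating from current to new, in closed form.
--     if new <= current:
--         return 0
--     return _art_total(new) - _art_total(current)
--
-- def calculate_kinain_art_cost(current_rating, new_rating):
--     if current_rating == 0:
--         return 3 + _raise_cost(1, new_rating)
--     return _raise_cost(current_rating, new_rating)
-- ===== Notes on version B (the rewrite author's own statement) =====
-- stated objective: faster
-- what changed: Replaced the per-rating accumulation loop by a telescoping closed form: a cumulative helper _art_total(r)=2r(r-1) is differenced between the endpoints, with the initial-cost case handled by a separate top-level branch.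
import Mathlib
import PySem

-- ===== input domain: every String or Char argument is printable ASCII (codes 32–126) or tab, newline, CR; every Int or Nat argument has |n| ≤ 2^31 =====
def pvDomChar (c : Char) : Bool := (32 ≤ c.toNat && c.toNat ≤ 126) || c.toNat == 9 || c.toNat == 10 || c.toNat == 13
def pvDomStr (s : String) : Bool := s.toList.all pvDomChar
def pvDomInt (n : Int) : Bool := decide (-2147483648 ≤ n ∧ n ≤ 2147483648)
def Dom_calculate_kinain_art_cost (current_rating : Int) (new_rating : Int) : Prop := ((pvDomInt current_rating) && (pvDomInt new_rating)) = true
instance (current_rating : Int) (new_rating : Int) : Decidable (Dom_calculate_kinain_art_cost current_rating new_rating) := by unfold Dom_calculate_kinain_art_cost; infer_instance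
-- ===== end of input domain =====

-- B replaces A's per-rating loop by a telescoping closed form via a cumulative helper (objective: faster).

-- ===== PORT A =====
def calculate_kinain_art_cost (current_rating : Int) (new_rating : Int) : Int :=
  -- total_cost = 0; if current_rating == 0: total_cost = 3; current_rating = 1
  let total_cost : Int := if current_rating = 0 then 3 else 0
  let current_rating : Int := if current_rating = 0 then 1 else current_rating
  -- for rating in range(current_rating + 1, new_rating + 1): total_cost += (rating - 1) * 4
  (PySem.List.pyRange (current_rating + 1) (new_rating + 1) 1).foldl
    (fun acc rating => acc + (rating - 1) * 4) total_cost

-- ===== PORT B =====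
-- Cumulative cost function: art_total n - art_total c telescopes the 4*(i-1) terms.
def art_total (rating : Int) : Int := 2 * rating * (rating - 1)

-- Cost to raise a nonzero rating from current to new, in closed form.
def raise_cost (current : Int) (new : Int) : Int :=
  if new ≤ current then 0 else art_total new - art_total current

def calculate_kinain_art_cost_alt (current_rating : Int) (new_rating : Int) : Int :=
  if current_rating = 0 then 3 + raise_cost 1 new_rating
  else raise_cost current_rating new_rating

-- ===== PRECONDITION & SPEC =====
def Spec_calculate_kinain_art_cost (current_rating : Int) (new_rating : Int) (out : Int) : Prop := out = calculate_kinain_art_cost_alt current_rating new_rating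
instance (current_rating : Int) (new_rating : Int) (out : Int) : Decidable (Spec_calculate_kinain_art_cost current_rating new_rating out) := by unfold Spec_calculate_kinain_art_cost; infer_instance

-- ===== CLAIM (what is proved, stated in full; the proofs are below) =====
def Claim_equal_calculate_kinain_art_cost : Prop := ∀ (current_rating : Int) (new_rating : Int), Dom_calculate_kinain_art_cost current_rating new_rating → Spec_calculate_kinain_art_cost current_rating new_rating (calculate_kinain_art_cost current_rating new_rating)

-- ===== LEMMAS AND PROOFS =====

-- A's loop over range(c+1, c+k+1) accumulating (rating-1)*4 telescopes to art_total (c+k) - art_total c.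
theorem kinain_loop_closed (c : Int) (k : Nat) (s : Int) :
    (PySem.List.pyRange (c + 1) (c + k + 1) 1).foldl (fun acc rating => acc + (rating - 1) * 4) s
      = s + (art_total (c + k) - art_total c) := by
  induction k generalizing s with
  | zero =>
    rw [PySem.List.pyRange_one_eq_nil (by push_cast; omega)]
    simp only [List.foldl_nil, art_total]; push_cast; ring
  | succ m ih =>
    have h : (c + 1 : Int) ≤ c + m + 1 := by omega
    have : (c + (m + 1 : Nat) + 1 : Int) = (c + m + 1) + 1 := by push_cast; ring
    rw [this, PySem.List.pyRange_one_succ_right h, List.foldl_append, ih]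
    simp only [List.foldl, art_total]
    push_cast; ring

theorem kinain_loop_empty (c n : Int) (s : Int) (h : n ≤ c) :
    (PySem.List.pyRange (c + 1) (n + 1) 1).foldl (fun acc rating => acc + (rating - 1) * 4) s = s := by
  rw [PySem.List.pyRange_one_eq_nil (by omega)]; rfl

-- A's loop equals raise_cost for arbitrary integer endpoints.
theorem kinain_loop_raise_cost (c n s : Int) :
    (PySem.List.pyRange (c + 1) (n + 1) 1).foldl (fun acc rating => acc + (rating - 1) * 4) s
      = s + raise_cost c n := by
  by_cases h : n ≤ c
  · rw [kinain_loop_empty c n s h, raise_cost, if_pos h]; ring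
  · obtain ⟨k, hnk, hk⟩ : ∃ k : Nat, n = c + k ∧ 0 < k := ⟨(n - c).toNat, by omega, by omega⟩
    rw [hnk, kinain_loop_closed, raise_cost, if_neg (by omega : ¬ (c + (k:Int) ≤ c))]

-- ===== VERDICT (by name: the statement is the Claim_ definition above) =====
theorem calculate_kinain_art_cost_spec : Claim_equal_calculate_kinain_art_cost := by
  intro c n _
  unfold Spec_calculate_kinain_art_cost calculate_kinain_art_cost calculate_kinain_art_cost_alt
  by_cases hc : c = 0
  · simp only [if_pos hc, kinain_loop_raise_cost]
  · simp only [if_neg hc, kinain_loop_raise_cost]; ring
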